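-- pv_equiv track=rewrite | github.com/anjan-r-athreya/notebook2production | grouper.py | _suggest_function_name
-- ===== SOURCE A (Python) =====
-- from typing import Dict, List, Set, Any, Tuple
--
-- def _suggest_function_name(category: str, parameters: Set[str],
--                            returns: Set[str]) -> str:
--     """Suggest a function name based on the group's purpose.
--
--     Args:
--         category: Cell category
--         parameters: Input parameters
--         returns: Return values
--
--     Returns:
--         Suggested function name
--     """
--     # Base name from category
--     base_names = {
--         'data': 'load_data',
--         'feature': 'engineer_features',
--         'model': 'train_model',
--         'visualization': 'create_visualization',
--         'utility': 'process_data'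
--     }
--
--     base_name = base_names.get(category, 'process')
--
--     # Make more specific based on returns
--     return_str = ' '.join(str(r).lower() for r in returns) if returns else ''
--
--     if category == 'data':
--         if 'clean' in return_str or 'processed' in return_str:
--             return 'load_and_clean_data'
--         return 'load_data'
--     elif category == 'feature':
--         if 'scaled' in return_str or 'normalized' in return_str:
--             return 'scale_features'
--         return 'engineer_features'
--     elif category == 'model':
--         if 'predict' in return_str:
--             return 'make_predictions'
--         elif 'evaluate' in return_str:
--             return 'evaluate_model'
--         return 'train_model'
--
--     return base_name
-- ===== SOURCE B (Python) =====
-- def _suggest_function_name(category, parameters, returns):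
--     table = {
--         'data': ('load_data', [(('clean', 'processed'), 'load_and_clean_data')]),
--         'feature': ('engineer_features', [(('scaled', 'normalized'), 'scale_features')]),
--         'model': ('train_model', [(('predict',), 'make_predictions'),
--                                   (('evaluate',), 'evaluate_model')]),
--         'visualization': ('create_visualization', []),
--         'utility': ('process_data', []),
--     }
--     return_str = ' '.join(str(r).lower() for r in returns) if returns else ''
--     default, rules = table.get(category, ('process', []))
--     for keywords, name in rules:
--         if any(kw in return_str for kw in keywords):
--             return name
--     return default
-- ===== Notes on version B (the rewrite author's own statement) =====
-- stated objective: simpler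
-- what changed: Replaces A's unused-dict-plus-if/elif-chain with a single dispatch table mapping each category to (default name, ordered keyword rules) and one generic first-match scan over the rules.
import Mathlib
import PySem

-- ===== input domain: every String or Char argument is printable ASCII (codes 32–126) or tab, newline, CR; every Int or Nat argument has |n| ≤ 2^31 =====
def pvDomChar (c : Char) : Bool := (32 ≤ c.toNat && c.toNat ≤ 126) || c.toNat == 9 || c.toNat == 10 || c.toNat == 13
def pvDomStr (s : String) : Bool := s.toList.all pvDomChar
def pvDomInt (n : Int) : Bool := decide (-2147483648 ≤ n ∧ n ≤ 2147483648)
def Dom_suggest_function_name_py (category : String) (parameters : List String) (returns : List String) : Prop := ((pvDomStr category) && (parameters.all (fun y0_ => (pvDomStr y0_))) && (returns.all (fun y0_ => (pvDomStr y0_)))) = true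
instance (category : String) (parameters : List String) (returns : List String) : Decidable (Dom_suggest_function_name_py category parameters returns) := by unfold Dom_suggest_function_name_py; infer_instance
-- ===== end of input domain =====

-- B replaces A's if/elif chain by a single dispatch table mapping each category to
-- (default name, ordered keyword rules) scanned for the first matching keyword (objective: simpler).

-- ===== PORT A =====
def suggest_function_name_py (category : String) (parameters : List String) (returns : List String) : String :=
  let base_names : PySem.Dict String String :=
    ((((PySem.Dict.empty.insert "data" "load_data").insert "feature" "engineer_features").insert
        "model" "train_model").insert "visualization" "create_visualization").insert
        "utility" "process_data"
  let base_name := base_names.getD category "process"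
  let return_str :=
    if returns ≠ [] then PySem.Str.join " " (returns.map (fun r => PySem.Str.lower r)) else ""
  if category = "data" then
    if PySem.Str.isIn "clean" return_str || PySem.Str.isIn "processed" return_str then
      "load_and_clean_data"
    else "load_data"
  else if category = "feature" then
    if PySem.Str.isIn "scaled" return_str || PySem.Str.isIn "normalized" return_str then
      "scale_features"
    else "engineer_features"
  else if category = "model" then
    if PySem.Str.isIn "predict" return_str then "make_predictions"
    else if PySem.Str.isIn "evaluate" return_str then "evaluate_model"
    else "train_model"
  else base_name

-- ===== PORT B =====
-- the dispatch table: category ↦ (default name, ordered list of (keywords, name) rules)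
def pvTable : PySem.Dict String (String × List (List String × String)) :=
  ((((PySem.Dict.empty.insert "data" ("load_data", [(["clean", "processed"], "load_and_clean_data")])).insert
      "feature" ("engineer_features", [(["scaled", "normalized"], "scale_features")])).insert
      "model" ("train_model", [(["predict"], "make_predictions"), (["evaluate"], "evaluate_model")])).insert
      "visualization" ("create_visualization", [])).insert
      "utility" ("process_data", [])

-- 'for keywords, name in rules: if any(kw in return_str …): return name; return default'
def pvFirstRule (return_str : String) (rules : List (List String × String)) (dflt : String) : String :=
  match rules with
  | [] => dflt
  | (kws, name) :: rest =>
    if kws.any (fun kw => PySem.Str.isIn kw return_str) then name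
    else pvFirstRule return_str rest dflt

def suggest_function_name_py_alt (category : String) (parameters : List String) (returns : List String) : String :=
  let return_str :=
    if returns ≠ [] then PySem.Str.join " " (returns.map (fun r => PySem.Str.lower r)) else ""
  let entry := pvTable.getD category ("process", [])
  pvFirstRule return_str entry.2 entry.1

-- ===== PRECONDITION & SPEC =====
def Spec_suggest_function_name_py (category : String) (parameters : List String) (returns : List String) (out : String) : Prop := out = suggest_function_name_py_alt category parameters returns
instance (category : String) (parameters : List String) (returns : List String) (out : String) : Decidable (Spec_suggest_function_name_py category parameters returns out) := by unfold Spec_suggest_function_name_py; infer_instance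

-- ===== CLAIM (what is proved, stated in full; the proofs are below) =====
def Claim_equal_suggest_function_name_py : Prop := ∀ (category : String) (parameters : List String) (returns : List String), Dom_suggest_function_name_py category parameters returns → Spec_suggest_function_name_py category parameters returns (suggest_function_name_py category parameters returns)

-- ===== LEMMAS AND PROOFS =====

-- ===== VERDICT (by name: the statement is the Claim_ definition above) =====
theorem suggest_function_name_py_spec : Claim_equal_suggest_function_name_py := by
  intro category parameters returns _
  unfold Spec_suggest_function_name_py suggest_function_name_py suggest_function_name_py_alt
  set rs := (if returns ≠ [] then PySem.Str.join " " (returns.map (fun r => PySem.Str.lower r)) else "") with hrs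
  by_cases h1 : category = "data"
  · subst h1
    simp [pvTable, pvFirstRule, PySem.Dict.getD_insert, PySem.Dict.getD_insert_self]
  · by_cases h2 : category = "feature"
    · subst h2
      simp [pvTable, pvFirstRule, PySem.Dict.getD_insert, PySem.Dict.getD_insert_self]
    · by_cases h3 : category = "model"
      · subst h3
        simp [pvTable, pvFirstRule, PySem.Dict.getD_insert, PySem.Dict.getD_insert_self]; rfl
      · by_cases h4 : category = "visualization"
        · subst h4
          simp [pvTable, pvFirstRule, PySem.Dict.getD_insert, PySem.Dict.getD_insert_self]
        · by_cases h5 : category = "utility"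
          · subst h5
            simp [pvTable, pvFirstRule, PySem.Dict.getD_insert_self]
          · simp [pvTable, pvFirstRule, PySem.Dict.getD_insert, PySem.Dict.getD_empty,
              h1, h2, h3, h4, h5]
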